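-- pv_equiv track=rewrite | github.com/noszczyn/portfolio_tracker | backend/portfolio_value.py | _resolve_currency
-- ===== SOURCE A (Python) =====
-- TICKER_SUFFIX_CURRENCY = {
--     ".US": "USD",
--     ".DE": "EUR",
--     ".UK": "GBP",
--     ".L": "GBP",
--     ".GB": "GBP",
--     ".SW": "CHF",
-- }
--
-- def _resolve_currency(ticker: str, stored_currency: str) -> str:
--     currency = (stored_currency or "PLN").upper()
--     if currency != "PLN":
--         return currency
--     symbol = (ticker or "").upper()
--     for suffix, inferred in TICKER_SUFFIX_CURRENCY.items():
--         if symbol.endswith(suffix):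
--             return inferred
--     return currency
-- ===== SOURCE B (Python) =====
-- TICKER_SUFFIX_CURRENCY = {
--     ".US": "USD",
--     ".DE": "EUR",
--     ".UK": "GBP",
--     ".L": "GBP",
--     ".GB": "GBP",
--     ".SW": "CHF",
-- }
--
-- def _resolve_currency(ticker: str, stored_currency: str) -> str:
--     currency = (stored_currency or "PLN").upper()
--     if currency != "PLN":
--         return currency
--     symbol = (ticker or "").upper()
--     if "." in symbol:
--         return TICKER_SUFFIX_CURRENCY.get("." + symbol.rsplit(".", 1)[-1], currency)
--     return currency
-- ===== Notes on version B (the rewrite author's own statement) =====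
-- stated objective: idiomatic
-- what changed: B replaces A's linear endswith scan over the suffix table by computing the ticker's trailing '.'-segment once and doing a single direct dict lookup keyed on it (guarded by a dot being present).
import Mathlib
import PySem

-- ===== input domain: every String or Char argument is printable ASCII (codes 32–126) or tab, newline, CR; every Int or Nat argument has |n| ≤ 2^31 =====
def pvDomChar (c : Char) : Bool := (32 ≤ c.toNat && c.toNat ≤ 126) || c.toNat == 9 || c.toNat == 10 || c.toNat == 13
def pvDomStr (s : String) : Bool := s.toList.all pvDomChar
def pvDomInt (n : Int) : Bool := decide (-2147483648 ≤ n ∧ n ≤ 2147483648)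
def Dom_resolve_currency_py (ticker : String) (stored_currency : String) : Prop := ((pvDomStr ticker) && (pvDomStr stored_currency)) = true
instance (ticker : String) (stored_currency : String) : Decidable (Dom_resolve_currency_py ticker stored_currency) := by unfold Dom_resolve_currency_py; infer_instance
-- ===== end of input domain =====

-- B replaces A's endswith scan over the suffix table by one direct dict lookup keyed on the
-- ticker's trailing '.'-segment (objective: idiomatic; no measured speed claim).

-- ===== PORT A =====
-- TICKER_SUFFIX_CURRENCY (module-level dict; iterated in insertion order by A, looked up by key in B)
def tickerSuffixCurrency : List (String × String) :=
  [(".US", "USD"), (".DE", "EUR"), (".UK", "GBP"), (".L", "GBP"), (".GB", "GBP"), (".SW", "CHF")]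

-- the for-loop over TICKER_SUFFIX_CURRENCY.items(): first suffix match wins
def scanSuffixes (table : List (String × String)) (symbol : String) : Option String :=
  match table with
  | [] => none
  | (suffix, inferred) :: rest =>
      if PySem.Str.endswith symbol suffix then some inferred else scanSuffixes rest symbol

def resolve_currency_py (ticker : String) (stored_currency : String) : String :=
  let currency := PySem.Str.upper (if stored_currency = "" then "PLN" else stored_currency)
  if currency ≠ "PLN" then currency
  else
    let symbol := PySem.Str.upper (if ticker = "" then "" else ticker)
    match scanSuffixes tickerSuffixCurrency symbol with
    | some inferred => inferred
    | none => currency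

-- ===== PORT B =====
def resolve_currency_py_alt (ticker : String) (stored_currency : String) : String :=
  let currency := PySem.Str.upper (if stored_currency = "" then "PLN" else stored_currency)
  if currency ≠ "PLN" then currency
  else
    let symbol := PySem.Str.upper (if ticker = "" then "" else ticker)
    if PySem.Str.isIn "." symbol then
      -- "." + symbol.rsplit(".", 1)[-1] — hand port (no rsplit in PySem), exact here:
      -- the last piece of rsplit('.', 1) is the segment after the LAST '.'
      let key := String.ofList ('.' :: (symbol.toList.reverse.takeWhile (fun c => c ≠ '.')).reverse)
      PySem.Dict.getD (PySem.Dict.mk tickerSuffixCurrency) key currency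
    else currency

-- ===== PRECONDITION & SPEC =====
def Spec_resolve_currency_py (ticker : String) (stored_currency : String) (out : String) : Prop := out = resolve_currency_py_alt ticker stored_currency
instance (ticker : String) (stored_currency : String) (out : String) : Decidable (Spec_resolve_currency_py ticker stored_currency out) := by unfold Spec_resolve_currency_py; infer_instance

-- ===== CLAIM (what is proved, stated in full; the proofs are below) =====
def Claim_equal_resolve_currency_py : Prop := ∀ (ticker : String) (stored_currency : String), Dom_resolve_currency_py ticker stored_currency → Spec_resolve_currency_py ticker stored_currency (resolve_currency_py ticker stored_currency)

-- ===== LEMMAS AND PROOFS =====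

-- takeWhile over a block of satisfying elements stops exactly at the first failing one
lemma takeWhile_block (p : Char → Bool) (l : List Char) (h : ∀ c ∈ l, p c = true)
    (c : Char) (hc : p c = false) (t : List Char) : (l ++ c :: t).takeWhile p = l := by
  simp [List.takeWhile_append, hc]
  exact fun _ => h

-- core: a string ends with '.'::k (k dot-free) iff it contains a '.' and its
-- segment after the last '.' is exactly k
lemma endswith_dot_iff (r k : List Char) (hk : '.' ∉ k) :
    (('.' :: k) <:+ r) ↔ ('.' ∈ r ∧ (r.reverse.takeWhile (fun c => c ≠ '.')).reverse = k) := by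
  have hPk : ∀ c ∈ k.reverse, (fun c => decide (c ≠ '.')) c = true := by
    intro c hc
    simp only [decide_eq_true_iff]
    intro h
    exact hk (h ▸ List.mem_reverse.mp hc)
  rw [← List.reverse_prefix]
  simp only [List.reverse_cons]
  constructor
  · rintro ⟨t, ht⟩
    have hrv : r.reverse = k.reverse ++ '.' :: t := by
      rw [← ht]; simp
    have hblk : r.reverse.takeWhile (fun c => decide (c ≠ '.')) = k.reverse := by
      rw [hrv]; exact takeWhile_block _ _ hPk '.' (by simp) t
    constructor
    · rw [← List.mem_reverse, hrv]; simp
    · rw [hblk, List.reverse_reverse]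
  · rintro ⟨hmem, hseg⟩
    have hkr : r.reverse.takeWhile (fun c => decide (c ≠ '.')) = k.reverse := by
      rw [← hseg, List.reverse_reverse]
    have hsplit := List.takeWhile_append_dropWhile (p := fun c => decide (c ≠ '.')) (l := r.reverse)
    have hmem' : '.' ∈ r.reverse.dropWhile (fun c => decide (c ≠ '.')) := by
      have hmr : '.' ∈ r.reverse := List.mem_reverse.mpr hmem
      rw [← hsplit] at hmr
      rcases List.mem_append.mp hmr with h | h
      · exact absurd (List.mem_takeWhile_imp h) (by simp)
      · exact h
    have hne : r.reverse.dropWhile (fun c => decide (c ≠ '.')) ≠ [] := by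
      intro h; rw [h] at hmem'; exact List.not_mem_nil hmem'
    obtain ⟨hd, tl, hdt⟩ := List.exists_cons_of_ne_nil hne
    have hhd : hd = '.' := by
      have h3 := List.head_dropWhile_not (fun c => decide (c ≠ '.')) hne
      simp only [hdt, List.head_cons] at h3
      simpa using h3
    have hr : r.reverse = k.reverse ++ '.' :: tl := by
      rw [← hsplit, hkr, hdt, hhd]
    exact ⟨tl, by simp [hr]⟩

-- Bool form on Str, for a literal suffix given via its toList
lemma str_endswith_dot (s suf : String) (k : List Char) (hsuf : suf.toList = '.' :: k)
    (hk : '.' ∉ k) :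
    PySem.Str.endswith s suf =
      (decide ('.' ∈ s.toList) && ((s.toList.reverse.takeWhile (fun c => c ≠ '.')).reverse == k)) := by
  have key : PySem.Str.endswith s suf = true ↔
      ('.' ∈ s.toList ∧ (s.toList.reverse.takeWhile (fun c => c ≠ '.')).reverse = k) := by
    rw [show PySem.Str.endswith s suf = PySem.Chars.endswith s.toList suf.toList from by simp,
        PySem.Chars.endswith_iff, hsuf]
    exact endswith_dot_iff s.toList k hk
  by_cases hm : '.' ∈ s.toList
  · by_cases he : (s.toList.reverse.takeWhile (fun c => c ≠ '.')).reverse = k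
    · rw [key.mpr ⟨hm, he⟩, decide_eq_true hm, beq_iff_eq.mpr he, Bool.true_and]
    · rw [Bool.eq_false_iff.mpr (fun h => he (key.mp h).2), beq_false_of_ne he, Bool.and_false]
  · rw [Bool.eq_false_iff.mpr (fun h => hm (key.mp h).1), decide_eq_false hm, Bool.false_and]

lemma isIn_dot (s : String) : PySem.Str.isIn "." s = decide ('.' ∈ s.toList) := by
  have key : PySem.Str.isIn "." s = true ↔ '.' ∈ s.toList := by
    rw [PySem.Str.isIn_iff_infix]
    exact (show (".").toList = ['.'] from rfl) ▸ List.singleton_infix_iff '.' s.toList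
  by_cases hm : '.' ∈ s.toList
  · rw [key.mpr hm, decide_eq_true hm]
  · rw [Bool.eq_false_iff.mpr (fun h => hm (key.mp h)), decide_eq_false hm]

-- the dict key built from the trailing segment matches exactly when the segment does
lemma key_beq (seg k : List Char) (suf : String) (hsuf : suf.toList = '.' :: k) :
    (suf == String.ofList ('.' :: seg)) = (seg == k) := by
  have h1 : suf = String.ofList ('.' :: k) := by rw [← hsuf, String.ofList_toList]
  by_cases h : seg = k
  · subst h; rw [h1]; simp
  · have h2 : String.ofList ('.' :: k) ≠ String.ofList ('.' :: seg) := by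
      simp [String.ofList_inj]
      exact fun hx => (h hx.symm).elim
    rw [h1, beq_false_of_ne h2, beq_false_of_ne (fun hx => h hx)]

-- ===== VERDICT (by name: the statement is the Claim_ definition above) =====
theorem resolve_currency_py_spec : Claim_equal_resolve_currency_py := by
  intro ticker stored_currency _
  unfold Spec_resolve_currency_py resolve_currency_py resolve_currency_py_alt
  by_cases hc : PySem.Str.upper (if stored_currency = "" then "PLN" else stored_currency) = "PLN"
  · simp only [hc, ne_eq, not_true_eq_false, if_false]
    set symbol := PySem.Str.upper (if ticker = "" then "" else ticker) with hs
    rw [isIn_dot]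
    simp only [scanSuffixes, tickerSuffixCurrency,
        str_endswith_dot symbol ".US" ['U','S'] rfl (by decide),
        str_endswith_dot symbol ".DE" ['D','E'] rfl (by decide),
        str_endswith_dot symbol ".UK" ['U','K'] rfl (by decide),
        str_endswith_dot symbol ".L" ['L'] rfl (by decide),
        str_endswith_dot symbol ".GB" ['G','B'] rfl (by decide),
        str_endswith_dot symbol ".SW" ['S','W'] rfl (by decide)]
    by_cases hdot : '.' ∈ symbol.toList
    · rw [decide_eq_true hdot]
      simp only [Bool.true_and, if_true]
      set seg := (symbol.toList.reverse.takeWhile (fun c => c ≠ '.')).reverse with hseg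
      simp only [PySem.Dict.getD_eq_get?_getD, PySem.Dict.get?_mk_cons,
        key_beq seg ['U','S'] ".US" rfl,
        key_beq seg ['D','E'] ".DE" rfl,
        key_beq seg ['U','K'] ".UK" rfl,
        key_beq seg ['L'] ".L" rfl,
        key_beq seg ['G','B'] ".GB" rfl,
        key_beq seg ['S','W'] ".SW" rfl]
      split_ifs <;> simp_all [PySem.Dict.get?]
    · rw [decide_eq_false hdot]
      simp only [Bool.false_and, Bool.false_eq_true, if_false]
  · simp only [hc, ne_eq, not_false_eq_true, if_true]
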